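-- pv_equiv track=rewrite | github.com/khoih-prog/skills | skills/bowenliang123/markdown-exporter/scripts/services/svc_md_to_ipynb.py | _enforce_code_cells
-- ===== SOURCE A (Python) =====
-- def _enforce_code_cells(md_text: str) -> str:
--     lines = md_text.splitlines()
--     processed_lines = []
--     is_in_codeblock = False
--     MD_CODEBLOCK_DELIMITER = "```"
--     for line in lines:
--         if line == MD_CODEBLOCK_DELIMITER or line.lstrip().startswith(MD_CODEBLOCK_DELIMITER):
--             if not is_in_codeblock:
--                 processed_lines.append("```code")
--                 is_in_codeblock = True
--             else:
--                 processed_lines.append(MD_CODEBLOCK_DELIMITER)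
--                 is_in_codeblock = False
--         else:
--             processed_lines.append(line)
--     processed_md = "\n".join(processed_lines)
--     return processed_md
-- ===== SOURCE B (Python) =====
-- def _is_fence(line):
--     return line == "```" or line.lstrip().startswith("```")
--
--
-- def _split_at_fence(lines):
--     """Split into (lines before the first fence, lines from the first fence on)."""
--     for i, line in enumerate(lines):
--         if _is_fence(line):
--             return lines[:i], lines[i:]
--     return lines, []
--
--
-- def _enforce_code_cells(md_text: str) -> str:
--     # Block decomposition: repeatedly consume one whole code block (an opening
--     # and a closing fence) per step, copying the segments between fences wholesale.
--     out = []
--     rest = md_text.splitlines()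
--     while True:
--         pre, mid = _split_at_fence(rest)
--         out += pre
--         if not mid:
--             return "\n".join(out)
--         out.append("```code")
--         pre2, mid2 = _split_at_fence(mid[1:])
--         out += pre2
--         if not mid2:
--             return "\n".join(out)
--         out.append("```")
--         rest = mid2[1:]
-- ===== Notes on version B (the rewrite author's own statement) =====
-- stated objective: alternative
-- what changed: Replaces A's per-line stateful sweep (a boolean toggle deciding what each line becomes) by a block decomposition: a loop that consumes one whole code block per step, splitting the remaining lines at the next fence, copying the in-between segments wholesale, and emitting the opening/closing markers by position in the block, with no per-line state.
import Mathlib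
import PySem

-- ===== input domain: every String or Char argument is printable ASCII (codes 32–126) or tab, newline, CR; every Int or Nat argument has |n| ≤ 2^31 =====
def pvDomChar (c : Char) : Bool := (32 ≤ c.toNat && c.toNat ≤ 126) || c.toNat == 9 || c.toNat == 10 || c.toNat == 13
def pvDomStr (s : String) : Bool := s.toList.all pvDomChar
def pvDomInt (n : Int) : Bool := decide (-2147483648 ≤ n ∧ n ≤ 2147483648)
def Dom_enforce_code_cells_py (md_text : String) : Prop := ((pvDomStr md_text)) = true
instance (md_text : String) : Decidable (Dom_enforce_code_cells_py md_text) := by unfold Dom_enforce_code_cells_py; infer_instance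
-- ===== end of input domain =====

-- B replaces A's per-line toggle sweep by a block-at-a-time loop: split the remaining
-- lines at the next fence, copy segments wholesale, emit markers by position (objective: alternative).

-- ===== PORT A =====
-- line == "```" or line.lstrip().startswith("```")
def isFenceA (line : String) : Bool :=
  line == "```" || PySem.Str.startswith (PySem.Str.lstrip line) "```"

-- the body of A's for-loop (state: processed_lines, is_in_codeblock)
def stepA (st : List String × Bool) (line : String) : List String × Bool :=
  if isFenceA line then
    if !st.2 then (st.1 ++ ["```code"], true)
    else (st.1 ++ ["```"], false)
  else (st.1 ++ [line], st.2)

def enforce_code_cells_py (md_text : String) : String :=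
  let lines := PySem.Str.splitlines md_text
  let st := lines.foldl stepA ([], false)
  PySem.Str.join "\n" st.1

-- ===== PORT B =====
def isFenceB (line : String) : Bool :=
  line == "```" || PySem.Str.startswith (PySem.Str.lstrip line) "```"

-- _split_at_fence: (lines before the first fence, lines from the first fence on)
def splitAtFence : List String → List String × List String
  | [] => ([], [])
  | l :: ls =>
    if isFenceB l then ([], l :: ls)
    else ((splitAtFence ls).1.cons l, (splitAtFence ls).2)

lemma splitAtFence_snd_len (ls : List String) : (splitAtFence ls).2.length ≤ ls.length := by
  induction ls with
  | nil => simp [splitAtFence]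
  | cons l tl ih => by_cases h : isFenceB l <;> simp [splitAtFence, h] <;> omega

-- B's while-loop (state: out, rest); one code block consumed per iteration
def renderLoop (out rest : List String) : List String :=
  match h1 : splitAtFence rest with
  | (pre, []) => out ++ pre
  | (pre, _ :: midtail) =>
    match h2 : splitAtFence midtail with
    | (pre2, []) => out ++ pre ++ ["```code"] ++ pre2
    | (pre2, _ :: mid2tail) =>
      renderLoop (out ++ pre ++ ["```code"] ++ pre2 ++ ["```"]) mid2tail
termination_by rest.length
decreasing_by
  have a1 := splitAtFence_snd_len rest
  have a2 := splitAtFence_snd_len midtail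
  rw [h1] at a1; rw [h2] at a2
  simp at a1 a2; omega

def enforce_code_cells_py_alt (md_text : String) : String :=
  renderLoop [] (PySem.Str.splitlines md_text) |> PySem.Str.join "\n"

-- ===== PRECONDITION & SPEC =====
def Spec_enforce_code_cells_py (md_text : String) (out : String) : Prop := out = enforce_code_cells_py_alt md_text
instance (md_text : String) (out : String) : Decidable (Spec_enforce_code_cells_py md_text out) := by unfold Spec_enforce_code_cells_py; infer_instance

-- ===== CLAIM (what is proved, stated in full; the proofs are below) =====
def Claim_equal_enforce_code_cells_py : Prop := ∀ (md_text : String), Dom_enforce_code_cells_py md_text → Spec_enforce_code_cells_py md_text (enforce_code_cells_py md_text)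

-- ===== LEMMAS AND PROOFS =====

-- A's sweep as a structural recursion on the lines, with the toggle flag as parameter.
def procA : List String → Bool → List String
  | [], _ => []
  | l :: ls, b =>
    if isFenceA l then (if !b then "```code" else "```") :: procA ls (!b)
    else l :: procA ls b

lemma foldA_eq (lines : List String) (acc : List String) (b : Bool) :
    (lines.foldl stepA (acc, b)).1 = acc ++ procA lines b := by
  induction lines generalizing acc b with
  | nil => simp [procA]
  | cons l ls ih =>
    rw [List.foldl_cons]
    by_cases hf : isFenceA l = true
    · cases b
      · rw [show stepA (acc, false) l = (acc ++ ["```code"], true) by simp [stepA, hf]]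
        rw [ih]; simp [procA, hf]
      · rw [show stepA (acc, true) l = (acc ++ ["```"], false) by simp [stepA, hf]]
        rw [ih]; simp [procA, hf]
    · rw [show stepA (acc, b) l = (acc ++ [l], b) by simp [stepA, hf]]
      rw [ih]; simp [procA, hf]

-- characterisation of splitAtFence: it splits ls at the first fence
lemma splitAtFence_append (ls : List String) :
    (splitAtFence ls).1 ++ (splitAtFence ls).2 = ls := by
  induction ls with
  | nil => simp [splitAtFence]
  | cons l tl ih => by_cases h : isFenceB l <;> simp [splitAtFence, h, ih]

lemma splitAtFence_fst_nofence (ls : List String) :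
    ∀ x ∈ (splitAtFence ls).1, isFenceA x = false := by
  induction ls with
  | nil => simp [splitAtFence]
  | cons l tl ih =>
    by_cases h : isFenceB l
    · simp [splitAtFence, h]
    · simp only [splitAtFence, h, if_false, List.cons]
      intro x hx
      rcases List.mem_cons.mp hx with rfl | hx
      · simpa [isFenceA, isFenceB] using h
      · exact ih x hx

lemma splitAtFence_snd_head (ls : List String) (hd : String) (tl : List String)
    (h : (splitAtFence ls).2 = hd :: tl) : isFenceA hd = true := by
  induction ls with
  | nil => simp [splitAtFence] at h
  | cons l ls' ih =>
    by_cases hf : isFenceB l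
    · simp only [splitAtFence, hf, if_true] at h
      cases h; exact hf
    · simp only [splitAtFence, hf, if_false] at h
      exact ih h

-- procA passes a fence-free prefix through unchanged
lemma procA_append_nofence (p m : List String) (b : Bool)
    (hp : ∀ x ∈ p, isFenceA x = false) :
    procA (p ++ m) b = p ++ procA m b := by
  induction p with
  | nil => simp
  | cons x xs ih =>
    have hx : isFenceA x = false := hp x (List.mem_cons_self)
    simp only [List.cons_append, procA, hx, Bool.false_eq_true, if_false]
    rw [ih (fun y hy => hp y (List.mem_cons_of_mem _ hy))]

-- a fence-free list is unchanged by procA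
lemma procA_nofence (p : List String) (b : Bool)
    (hp : ∀ x ∈ p, isFenceA x = false) : procA p b = p := by
  have := procA_append_nofence p [] b hp
  simpa [procA] using this

-- the loop invariant: renderLoop appends procA rest false
lemma renderLoop_eq (out rest : List String) :
    renderLoop out rest = out ++ procA rest false := by
  induction out, rest using renderLoop.induct with
  | case1 out rest pre h1 =>
    rw [renderLoop]
    split
    · next pre' heq =>
      rw [h1] at heq; cases heq
      have hsplit := splitAtFence_append rest
      rw [h1] at hsplit; simp at hsplit
      rw [← hsplit, procA_nofence pre false
        (by have := splitAtFence_fst_nofence rest; rw [h1] at this; simpa using this)]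
    · next pre' hd' mt' heq => rw [h1] at heq; simp at heq
  | case2 out rest pre hd midtail h1 pre2 h2 =>
    rw [renderLoop]
    split
    · next pre' heq => rw [h1] at heq; simp at heq
    · next pre' hd' mt' heq =>
      rw [h1] at heq; cases heq
      split
      · next pre2' heq2 =>
        rw [h2] at heq2; cases heq2
        have hsplit := splitAtFence_append rest
        rw [h1] at hsplit; simp at hsplit
        have hsplit2 := splitAtFence_append midtail
        rw [h2] at hsplit2; simp at hsplit2
        have hhd : isFenceA hd = true := splitAtFence_snd_head rest hd midtail (by rw [h1])
        rw [← hsplit, procA_append_nofence pre _ false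
          (by have := splitAtFence_fst_nofence rest; rw [h1] at this; simpa using this)]
        simp only [procA, hhd, if_true, Bool.not_false]
        rw [← hsplit2, procA_nofence pre2 true
          (by have := splitAtFence_fst_nofence midtail; rw [h2] at this; simpa using this)]
        simp
      · next pre2' hd2' mt2' heq2 => rw [h2] at heq2; simp at heq2
  | case3 out rest pre hd midtail h1 pre2 hd2 mid2tail h2 ih =>
    rw [renderLoop]
    split
    · next pre' heq => rw [h1] at heq; simp at heq
    · next pre' hd' mt' heq =>
      rw [h1] at heq; cases heq
      split
      · next pre2' heq2 => rw [h2] at heq2; simp at heq2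
      · next pre2' hd2' mt2' heq2 =>
        rw [h2] at heq2; cases heq2
        rw [ih]
        have hsplit := splitAtFence_append rest
        rw [h1] at hsplit; simp at hsplit
        have hsplit2 := splitAtFence_append midtail
        rw [h2] at hsplit2; simp at hsplit2
        have hhd : isFenceA hd = true := splitAtFence_snd_head rest hd midtail (by rw [h1])
        have hhd2 : isFenceA hd2 = true := splitAtFence_snd_head midtail hd2 mid2tail (by rw [h2])
        rw [← hsplit, procA_append_nofence pre _ false
          (by have := splitAtFence_fst_nofence rest; rw [h1] at this; simpa using this)]
        simp only [procA, hhd, if_true, Bool.not_false]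
        rw [← hsplit2, procA_append_nofence pre2 _ true
          (by have := splitAtFence_fst_nofence midtail; rw [h2] at this; simpa using this)]
        simp [procA, hhd2]

-- ===== VERDICT (by name: the statement is the Claim_ definition above) =====
theorem enforce_code_cells_py_spec : Claim_equal_enforce_code_cells_py := by
  intro md_text _
  show PySem.Str.join "\n" ((PySem.Str.splitlines md_text).foldl stepA ([], false)).1
      = PySem.Str.join "\n" (renderLoop [] (PySem.Str.splitlines md_text))
  rw [foldA_eq, renderLoop_eq]
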